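-- pv_equiv track=rewrite | github.com/sinc-algo-study/algorithm | JiyeonHong/220124/[BOJ] 15686_치킨 배달.py | solution
-- ===== SOURCE A (Python) =====
-- from itertools import combinations
--
-- def solution(city, M):
--     # 치킨집, 집 좌표 찾기
--     chickens = []
--     houses = []
--     for r in range(len(city)):
--         for c in range(len(city)):
--             if city[r][c] == 2:
--                 chickens.append((r, c))
--             if city[r][c] == 1:
--                 houses.append((r, c))
--
--     chickensComb = list(combinations(chickens, M))
--
--     # 치킨집 M개 고를 경우, 도시치킨거리 최솟값 구하기
--     cityDist = 100 * 50 * 50 * 13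
--     for comb in chickensComb:
--         dist = 0  # 각 조합의 치킨 거리
--         for ht in houses:
--             houseDist = 100
--             r1, c1 = ht
--             for ct in comb:
--                 r2, c2 = ct
--                 houseDist = min(houseDist, abs(r1 - r2) + abs(c1 - c2))
--             dist += houseDist
--
--         cityDist = min(cityDist, dist)
--
--     return cityDist
-- ===== SOURCE B (Python) =====
-- def solution(city, M):
--     # Extract coordinates, precompute per-chicken distance columns, then
--     # enumerate M-subsets iteratively with an explicit stack, refining the
--     # per-house minimum vector incrementally (with can't-complete pruning).
--     n = len(city)
--     chickens = [(r, c) for r in range(n) for c in range(n) if city[r][c] == 2]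
--     houses = [(r, c) for r in range(n) for c in range(n) if city[r][c] == 1]
--     cols = [[abs(hr - cr) + abs(hc - cc) for (hr, hc) in houses]
--             for (cr, cc) in chickens]
--     best = 100 * 50 * 50 * 13
--     stack = [(0, M, [100] * len(houses))]
--     while stack:
--         j, k, cur = stack.pop()
--         if k == 0:
--             best = min(best, sum(cur))
--         elif 0 < k <= len(cols) - j:
--             stack.append((j + 1, k, cur))
--             stack.append((j + 1, k - 1, [min(a, b) for a, b in zip(cur, cols[j])]))
--     return best
-- ===== Notes on version B (the rewrite author's own statement) =====
-- stated objective: alternative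
-- what changed: B replaces itertools.combinations over chicken coordinates with an explicit-stack include/exclude search over a precomputed per-chicken distance-column table, refining a per-house running-minimum vector incrementally and pruning branches that cannot pick M shops.
import Mathlib
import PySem

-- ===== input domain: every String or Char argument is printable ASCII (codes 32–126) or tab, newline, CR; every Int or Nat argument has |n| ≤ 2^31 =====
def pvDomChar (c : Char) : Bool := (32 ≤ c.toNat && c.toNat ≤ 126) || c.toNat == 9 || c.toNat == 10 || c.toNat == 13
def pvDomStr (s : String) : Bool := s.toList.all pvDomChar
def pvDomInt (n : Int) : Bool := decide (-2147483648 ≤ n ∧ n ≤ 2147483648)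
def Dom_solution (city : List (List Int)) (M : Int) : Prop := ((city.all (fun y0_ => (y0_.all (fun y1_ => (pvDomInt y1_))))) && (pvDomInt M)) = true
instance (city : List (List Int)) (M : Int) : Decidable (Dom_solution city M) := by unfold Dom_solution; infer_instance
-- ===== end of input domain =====

-- B replaces the itertools.combinations enumeration by an explicit-stack include/exclude
-- search over a precomputed distance-column table (alternative decomposition, not claimed faster).


-- ===== PORT A =====
-- city[r][c] (both indices in range under Pre_; the defaults are never used there)
def cellAt (city : List (List Int)) (r c : Int) : Int :=
  PySem.List.pyGetD (PySem.List.pyGetD city r []) c 0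

-- the body of A's inner scan loop: the two appending ifs
def scanCell (city : List (List Int)) (r : Int)
    (st : List (Int × Int) × List (Int × Int)) (c : Int) :
    List (Int × Int) × List (Int × Int) :=
  let st := if cellAt city r c = 2 then (st.1 ++ [(r, c)], st.2) else st
  if cellAt city r c = 1 then (st.1, st.2 ++ [(r, c)]) else st

def solution (city : List (List Int)) (M : Int) : Int :=
  let n := (city.length : Int)
  let st := (PySem.List.pyRange 0 n 1).foldl
    (fun st r => (PySem.List.pyRange 0 n 1).foldl (scanCell city r) st)
    (([] : List (Int × Int)), ([] : List (Int × Int)))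
  let chickens := st.1
  let houses := st.2
  let chickensComb := PySem.List.combinations chickens M.toNat
  chickensComb.foldl (fun cityDist comb =>
    let dist := houses.foldl (fun dist ht =>
      let houseDist := comb.foldl (fun houseDist ct =>
        min houseDist (|ht.1 - ct.1| + |ht.2 - ct.2|)) 100
      dist + houseDist) 0
    min cityDist dist) (100 * 50 * 50 * 13)

-- ===== PORT B =====
-- the explicit-stack while loop of Source B; stack entries are (j, k, cur)
def loopB (cols : List (List Int)) : List (Nat × Int × List Int) → Int → Int
  | [], best => best
  | (j, k, cur) :: stack, best =>
    if k = 0 then loopB cols stack (min best cur.sum)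
    else if 0 < k ∧ k ≤ (cols.length : Int) - (j : Int) then
      loopB cols ((j + 1, k - 1, List.zipWith min cur (cols.getD j [])) :: (j + 1, k, cur) :: stack) best
    else loopB cols stack best
termination_by stack _ => (stack.map (fun e => 3 ^ (cols.length - e.1))).sum
decreasing_by
  all_goals simp
  · rename_i _h1 h2
    have hj : j < cols.length := by rcases h2 with ⟨hk, hle⟩; omega
    have h3 : (3 : ℕ) ^ (cols.length - j) = 3 ^ (cols.length - (j + 1)) * 3 := by
      rw [← pow_succ]; congr 1; omega
    have hp : 0 < (3 : ℕ) ^ (cols.length - (j + 1)) := by positivity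
    omega

def solution_alt (city : List (List Int)) (M : Int) : Int :=
  let n := (city.length : Int)
  let rng := PySem.List.pyRange 0 n 1
  let chickens := rng.flatMap (fun r => (rng.filter (fun c => cellAt city r c = 2)).map (fun c => (r, c)))
  let houses := rng.flatMap (fun r => (rng.filter (fun c => cellAt city r c = 1)).map (fun c => (r, c)))
  let cols := chickens.map (fun ct => houses.map (fun ht => |ht.1 - ct.1| + |ht.2 - ct.2|))
  loopB cols [(0, M, List.replicate houses.length 100)] (100 * 50 * 50 * 13)

-- ===== PRECONDITION & SPEC =====
-- Pre_ excludes exactly the inputs where A raises: a row shorter than len(city)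
-- (IndexError in the coordinate scan) and M < 0 (ValueError from combinations).
def Pre_solution (city : List (List Int)) (M : Int) : Prop :=
  (∀ row ∈ city, city.length ≤ row.length) ∧ 0 ≤ M
instance (city : List (List Int)) (M : Int) : Decidable (Pre_solution city M) := by
  unfold Pre_solution; infer_instance

def pvWitness_solution : List (List Int) × Int := ([[0, 2], [1, 0]], 1)

def Spec_solution (city : List (List Int)) (M : Int) (out : Int) : Prop := out = solution_alt city M
instance (city : List (List Int)) (M : Int) (out : Int) : Decidable (Spec_solution city M out) := by unfold Spec_solution; infer_instance

-- ===== CLAIM (what is proved, stated in full; the proofs are below) =====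
def Claim_equal_solution : Prop := ∀ (city : List (List Int)) (M : Int), Dom_solution city M → Pre_solution city M → Spec_solution city M (solution city M)

-- ===== LEMMAS AND PROOFS =====

-- proof-side pure view of loopB: the value contributed by one stack entry
def dfsP : List (List Int) → Int → List Int → Int
  | cols, k, cur =>
    if k = 0 then cur.sum
    else
      match cols with
      | [] => 100 * 50 * 50 * 13
      | c :: rest =>
        if 0 < k ∧ k ≤ ((c :: rest).length : Int) then
          min (dfsP rest (k - 1) (List.zipWith min cur c)) (dfsP rest k cur)
        else 100 * 50 * 50 * 13
termination_by cols _ _ => cols.length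
decreasing_by all_goals simp

theorem dfsP_zero (cols : List (List Int)) (cur : List Int) : dfsP cols 0 cur = cur.sum := by
  rw [dfsP.eq_def]; simp

theorem dfsP_nil (k : Int) (cur : List Int) (hk : k ≠ 0) : dfsP [] k cur = 100 * 50 * 50 * 13 := by
  rw [dfsP.eq_def]; simp [hk]

theorem dfsP_cons (c : List Int) (rest : List (List Int)) (k : Int) (cur : List Int) (hk : k ≠ 0) :
    dfsP (c :: rest) k cur
      = if 0 < k ∧ k ≤ ((c :: rest).length : Int) then
          min (dfsP rest (k - 1) (List.zipWith min cur c)) (dfsP rest k cur)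
        else 100 * 50 * 50 * 13 := by
  rw [dfsP.eq_def]; simp [hk]

-- A's inner column loop appends exactly the filtered cells of the row
theorem scanCell_fold (city : List (List Int)) (r : Int) (l : List Int)
    (st : List (Int × Int) × List (Int × Int)) :
    l.foldl (scanCell city r) st
      = (st.1 ++ (l.filter (fun c => cellAt city r c = 2)).map (fun c => (r, c)),
         st.2 ++ (l.filter (fun c => cellAt city r c = 1)).map (fun c => (r, c))) := by
  induction l generalizing st with
  | nil => simp
  | cons a t ih =>
    obtain ⟨s1, s2⟩ := st
    simp only [List.foldl_cons, List.filter_cons]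
    rw [ih]
    by_cases h2 : cellAt city r a = 2 <;> by_cases h1 : cellAt city r a = 1 <;>
      simp [scanCell, h1, h2]

-- A's double scan loop equals the two comprehensions of B
theorem scan_fold (city : List (List Int)) (rng2 : List Int) (rs : List Int)
    (s1 s2 : List (Int × Int)) :
    rs.foldl (fun st r => rng2.foldl (scanCell city r) st) (s1, s2)
      = (s1 ++ rs.flatMap (fun r => (rng2.filter (fun c => cellAt city r c = 2)).map (fun c => (r, c))),
         s2 ++ rs.flatMap (fun r => (rng2.filter (fun c => cellAt city r c = 1)).map (fun c => (r, c)))) := by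
  induction rs generalizing s1 s2 with
  | nil => simp
  | cons a t ih =>
    simp only [List.foldl_cons, List.flatMap_cons]
    rw [scanCell_fold, ih]
    simp

-- zipWith min of two maps over the same list is a pointwise map
theorem zip_min_map {α : Type} (l : List α) (f g : α → Int) :
    List.zipWith min (l.map f) (l.map g) = l.map (fun x => min (f x) (g x)) := by
  simp [List.zipWith_map]

-- refining the per-house minimum vector column by column = A's per-house inner fold
theorem fold_cols (houses : List (Int × Int)) (comb : List (Int × Int)) (g : (Int × Int) → Int) :
    (comb.map (fun ct => houses.map (fun ht => |ht.1 - ct.1| + |ht.2 - ct.2|))).foldl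
        (fun cur col => List.zipWith min cur col) (houses.map g)
      = houses.map (fun ht => comb.foldl (fun hd ct => min hd (|ht.1 - ct.1| + |ht.2 - ct.2|)) (g ht)) := by
  induction comb generalizing g with
  | nil => simp
  | cons a t ih =>
    simp only [List.map_cons, List.foldl_cons]
    rw [zip_min_map, ih]

-- the score of a fully chosen combination, as loopB accumulates it
theorem dfsP_combs (cols : List (List Int)) (k : Int) (cur : List Int) (s : Int)
    (hk : 0 ≤ k) (hs : s ≤ 100 * 50 * 50 * 13) :
    min s (dfsP cols k cur)
      = (PySem.List.combinations cols k.toNat).foldl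
          (fun a c => min a ((c.foldl (fun cur col => List.zipWith min cur col) cur).sum)) s := by
  induction cols generalizing k cur s with
  | nil =>
    by_cases h0 : k = 0
    · subst h0; simp [dfsP, PySem.List.combinations_zero]
    · have ht : k.toNat = (k.toNat - 1) + 1 := by omega
      rw [ht, PySem.List.combinations_nil_succ]
      simp only [List.foldl_nil]
      rw [dfsP.eq_def]
      simp only [h0, if_false]
      omega
  | cons c rest ih =>
    by_cases h0 : k = 0
    · subst h0; simp [dfsP, PySem.List.combinations_zero]
    · by_cases hle : k ≤ ((c :: rest).length : Int)
      · have ht : k.toNat = (k - 1).toNat + 1 := by omega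
        rw [ht, PySem.List.combinations_cons_succ]
        rw [List.foldl_append, List.foldl_map]
        have e1 : (PySem.List.combinations rest (k - 1).toNat).foldl
            (fun a c' => min a (((c :: c').foldl (fun cur col => List.zipWith min cur col) cur).sum)) s
            = (PySem.List.combinations rest (k - 1).toNat).foldl
            (fun a c' => min a ((c'.foldl (fun cur col => List.zipWith min cur col) (List.zipWith min cur c)).sum)) s := by
          simp only [List.foldl_cons]
        rw [e1, ← ih (k - 1) (List.zipWith min cur c) s (by omega) hs]
        have hback : (k - 1).toNat + 1 = k.toNat := by omega
        rw [hback, ← ih k cur (min s (dfsP rest (k - 1) (List.zipWith min cur c)))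
              hk (le_trans (min_le_left _ _) hs)]
        rw [dfsP.eq_def]
        simp only [h0, if_false]
        rw [if_pos (And.intro (by omega : (0:Int) < k) hle)]
        rw [min_assoc]
      · have hlt : (c :: rest).length < k.toNat := by
          simp at hle ⊢; omega
        rw [PySem.List.combinations_eq_nil_of_length_lt _ hlt]
        simp only [List.foldl_nil]
        rw [dfsP.eq_def]
        simp only [h0, if_false]
        rw [if_neg (by push Not; intro _; omega : ¬(0 < k ∧ k ≤ (((c :: rest).length : Nat) : Int)))]
        omega

-- loopB equals the fold of dfsP-values over the stack
theorem loopB_fold (cols : List (List Int)) (stack : List (Nat × Int × List Int)) (best : Int) :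
    best ≤ 100 * 50 * 50 * 13 →
    loopB cols stack best
      = stack.foldl (fun b e => min b (dfsP (cols.drop e.1) e.2.1 e.2.2)) best := by
  induction stack, best using loopB.induct cols with
  | case1 best => simp [loopB]
  | case2 j cur stack best ih =>
    intro hb
    rw [loopB, if_pos rfl, ih (le_trans (min_le_left _ _) hb)]
    simp only [List.foldl_cons, dfsP_zero]
  | case3 j k cur stack best hk hg ih =>
    intro hb
    rw [loopB, if_neg hk, if_pos hg, ih hb]
    have hj : j < cols.length := by rcases hg with ⟨hk0, hle⟩; omega
    have hdrop : cols.drop j = cols[j] :: cols.drop (j + 1) := List.drop_eq_getElem_cons hj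
    have hgetD : cols.getD j [] = cols[j] := List.getD_eq_getElem cols [] hj
    have hlen : ((cols[j] :: cols.drop (j + 1)).length : Int) = (cols.length : Int) - j := by
      simp only [List.length_cons, List.length_drop]
      omega
    have hd : dfsP (cols.drop j) k cur
        = min (dfsP (cols.drop (j + 1)) (k - 1) (List.zipWith min cur cols[j]))
              (dfsP (cols.drop (j + 1)) k cur) := by
      rw [hdrop, dfsP_cons _ _ _ _ hk, if_pos (by rw [hlen]; exact hg)]
    simp only [List.foldl_cons, hgetD, hd]
    rw [min_assoc]
  | case4 j k cur stack best hk hg ih =>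
    intro hb
    rw [loopB, if_neg hk, if_neg hg, ih hb]
    have hd : dfsP (cols.drop j) k cur = 100 * 50 * 50 * 13 := by
      rcases hdj : cols.drop j with _ | ⟨c, rest⟩
      · exact dfsP_nil _ _ hk
      · have hj : j < cols.length := by
          by_contra h
          rw [List.drop_eq_nil_of_le (by omega)] at hdj
          exact absurd hdj (by simp)
        have h2 := congrArg List.length hdj
        simp only [List.length_drop, List.length_cons] at h2
        have hlen : ((c :: rest).length : Int) = (cols.length : Int) - j := by
          simp only [List.length_cons]
          omega
        rw [dfsP_cons _ _ _ _ hk, if_neg (by rw [hlen]; exact hg)]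
    simp only [List.foldl_cons, hd]
    congr 1
    omega

-- ===== VERDICT (by name: the statement is the Claim_ definition above) =====
theorem solution_spec : Claim_equal_solution := by
  intro city M hdom hpre
  unfold Spec_solution
  obtain ⟨hrows, hM⟩ := hpre
  simp only [solution, solution_alt]
  rw [scan_fold]
  simp only [List.nil_append]
  rw [loopB_fold _ _ _ (le_refl _)]
  simp only [List.foldl_cons, List.foldl_nil, List.drop_zero]
  rw [dfsP_combs _ M _ _ hM (le_refl _)]
  rw [PySem.List.combinations_map, List.foldl_map]
  congr 1
  funext a comb
  congr 1
  rw [PySem.List.foldl_add, zero_add]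
  have hrepl : List.replicate
      (List.flatMap (fun r => List.map (fun c => (r, c)) (List.filter (fun c => decide (cellAt city r c = 1)) (PySem.List.pyRange 0 (city.length : Int) 1))) (PySem.List.pyRange 0 (city.length : Int) 1)).length 100
      = List.map (fun _ => (100 : Int)) (List.flatMap (fun r => List.map (fun c => (r, c)) (List.filter (fun c => decide (cellAt city r c = 1)) (PySem.List.pyRange 0 (city.length : Int) 1))) (PySem.List.pyRange 0 (city.length : Int) 1)) := by
    simp
  rw [hrepl, fold_cols]
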